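-- pv_equiv track=rewrite | github.com/Chengjike/industry-news-bot | backend/services/news_ranking.py | _industry_keyword_match
-- ===== SOURCE A (Python) =====
-- def _parse_keywords(keyword_str: str) -> tuple[list[str], list[str], list[str]]:
--     """
--     解析关键词字符串，返回 (必须词, 排除词, 加分词)。
--     +word  → 必须包含
--     !word  → 必须排除
--     word   → 命中加分
--     """
--     must_have: list[str] = []
--     must_not: list[str] = []
--     bonus: list[str] = []
--
--     for token in keyword_str.split():
--         token = token.strip()
--         if not token:
--             continue
--         if token.startswith("+"):
--             must_have.append(token[1:].lower())
--         elif token.startswith("!"):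
--             must_not.append(token[1:].lower())
--         else:
--             bonus.append(token.lower())
--
--     return must_have, must_not, bonus
--
-- def _industry_keyword_match(text: str, keyword_str: str) -> bool:
--     """
--     行业关键词过滤（OR 语义）：
--     - +词 列表中至少命中一个 → 通过
--     - !词 命中任意一个 → 过滤
--     - 无 +词 配置 → 通过（仅做排除过滤）
--     """
--     text_lower = text.lower()
--     must_have, must_not, _ = _parse_keywords(keyword_str)
--
--     # 排除词：命中任意一个则过滤
--     for word in must_not:
--         if word in text_lower:
--             return False
--
--     # 必须词：OR 语义，至少命中一个
--     if must_have:
--         return any(word in text_lower for word in must_have)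
--
--     return True
-- ===== SOURCE B (Python) =====
-- def _industry_keyword_match(text: str, keyword_str: str) -> bool:
--     # Single fused pass over the tokens: no intermediate keyword lists.
--     text_lower = text.lower()
--     excluded = False
--     has_required = False
--     required_hit = False
--     for token in keyword_str.split():
--         if token.startswith("!"):
--             if token[1:].lower() in text_lower:
--                 excluded = True
--         elif token.startswith("+"):
--             has_required = True
--             if token[1:].lower() in text_lower:
--                 required_hit = True
--     return (not excluded) and (required_hit if has_required else True)
-- ===== Notes on version B (the rewrite author's own statement) =====
-- stated objective: simpler
-- what changed: Fuses _parse_keywords and the matching into a single pass over keyword_str.split() that keeps three Boolean flags (excluded, has_required, required_hit) instead of building three keyword lists and re-scanning them.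
import Mathlib
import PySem

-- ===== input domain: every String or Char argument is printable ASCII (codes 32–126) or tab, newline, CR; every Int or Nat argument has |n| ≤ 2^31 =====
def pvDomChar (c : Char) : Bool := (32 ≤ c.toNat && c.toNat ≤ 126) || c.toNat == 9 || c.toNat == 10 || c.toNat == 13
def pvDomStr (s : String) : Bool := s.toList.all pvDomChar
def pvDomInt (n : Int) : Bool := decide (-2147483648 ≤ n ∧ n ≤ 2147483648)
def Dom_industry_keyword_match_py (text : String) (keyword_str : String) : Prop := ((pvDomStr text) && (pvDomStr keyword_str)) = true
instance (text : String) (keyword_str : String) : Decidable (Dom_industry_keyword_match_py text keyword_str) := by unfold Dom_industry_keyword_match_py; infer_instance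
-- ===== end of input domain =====

-- B fuses _parse_keywords and the matching into ONE pass over the tokens keeping three
-- Booleans instead of three keyword lists (objective: simpler; same return value).

-- ===== PORT A =====
-- _parse_keywords: a fold over keyword_str.split() building (must_have, must_not, bonus)
def pvParseStep (acc : List (List Char) × List (List Char) × List (List Char)) (token : List Char) :
    List (List Char) × List (List Char) × List (List Char) :=
  let token := PySem.Chars.strip token
  if token = [] then acc
  else if PySem.Chars.startswith token ['+'] then
    (acc.1 ++ [PySem.Chars.lower (token.drop 1)], acc.2.1, acc.2.2)
  else if PySem.Chars.startswith token ['!'] then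
    (acc.1, acc.2.1 ++ [PySem.Chars.lower (token.drop 1)], acc.2.2)
  else
    (acc.1, acc.2.1, acc.2.2 ++ [PySem.Chars.lower token])

def pvParseKeywords (keyword_str : List Char) :
    List (List Char) × List (List Char) × List (List Char) :=
  (PySem.Chars.split₀ keyword_str).foldl pvParseStep ([], [], [])

def industry_keyword_match_py (text : String) (keyword_str : String) : Bool :=
  let text_lower := PySem.Chars.lower text.toList
  let p := pvParseKeywords keyword_str.toList
  -- 'for word in must_not: if word in text_lower: return False' is List.any
  if p.2.1.any (fun w => PySem.Chars.isIn w text_lower) then false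
  else if !p.1.isEmpty then p.1.any (fun w => PySem.Chars.isIn w text_lower)
  else true

-- ===== PORT B =====
-- one fused pass; state = (excluded, has_required, required_hit)
def pvFuseStep (text_lower : List Char) (s : Bool × Bool × Bool) (token : List Char) :
    Bool × Bool × Bool :=
  if PySem.Chars.startswith token ['!'] then
    (s.1 || PySem.Chars.isIn (PySem.Chars.lower (token.drop 1)) text_lower, s.2.1, s.2.2)
  else if PySem.Chars.startswith token ['+'] then
    (s.1, true, s.2.2 || PySem.Chars.isIn (PySem.Chars.lower (token.drop 1)) text_lower)
  else s

def industry_keyword_match_py_alt (text : String) (keyword_str : String) : Bool :=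
  let text_lower := PySem.Chars.lower text.toList
  let s := (PySem.Chars.split₀ keyword_str.toList).foldl (pvFuseStep text_lower) (false, false, false)
  if s.1 then false else if s.2.1 then s.2.2 else true

-- ===== PRECONDITION & SPEC =====
def Spec_industry_keyword_match_py (text : String) (keyword_str : String) (out : Bool) : Prop := out = industry_keyword_match_py_alt text keyword_str
instance (text : String) (keyword_str : String) (out : Bool) : Decidable (Spec_industry_keyword_match_py text keyword_str out) := by unfold Spec_industry_keyword_match_py; infer_instance

-- ===== CLAIM (what is proved, stated in full; the proofs are below) =====
def Claim_equal_industry_keyword_match_py : Prop := ∀ (text : String) (keyword_str : String), Dom_industry_keyword_match_py text keyword_str → Spec_industry_keyword_match_py text keyword_str (industry_keyword_match_py text keyword_str)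

-- ===== LEMMAS AND PROOFS =====

-- tokens produced by split₀ contain no whitespace characters
lemma pv_go_wsfree (s : List Char) :
    ∀ (cur : List Char) (acc : List (List Char)),
      (∀ c ∈ cur, PySem.Chars.isspace c = false) →
      (∀ t ∈ acc, ∀ c ∈ t, PySem.Chars.isspace c = false) →
      ∀ t ∈ PySem.Chars.split₀.go s cur acc, ∀ c ∈ t, PySem.Chars.isspace c = false := by
  induction s with
  | nil =>
    intro cur acc hcur hacc t ht
    simp only [PySem.Chars.split₀.go] at ht
    split at ht
    · simp only [List.mem_reverse] at ht; exact hacc t ht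
    · simp only [List.mem_reverse, List.mem_cons] at ht
      rcases ht with h | h
      · subst h; intro c hc; exact hcur c (List.mem_reverse.mp hc)
      · exact hacc t h
  | cons c rest ih =>
    intro cur acc hcur hacc t ht
    simp only [PySem.Chars.split₀.go] at ht
    split at ht
    · split at ht
      · exact ih [] acc (by simp) hacc t ht
      · refine ih [] (cur.reverse :: acc) (by simp) ?_ t ht
        intro u hu
        rcases List.mem_cons.mp hu with h | h
        · subst h; intro d hd; exact hcur d (List.mem_reverse.mp hd)
        · exact hacc u h
    · next hsp =>
      refine ih (c :: cur) acc ?_ hacc t ht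
      intro d hd
      rcases List.mem_cons.mp hd with h | h
      · subst h; exact Bool.not_eq_true _ ▸ (by simpa using hsp)
      · exact hcur d h

lemma pv_split₀_wsfree (s : List Char) :
    ∀ t ∈ PySem.Chars.split₀ s, ∀ c ∈ t, PySem.Chars.isspace c = false :=
  pv_go_wsfree s [] [] (by simp) (by simp)

-- strip is a no-op on a whitespace-free token
lemma pv_strip_id (t : List Char) (h : ∀ c ∈ t, PySem.Chars.isspace c = false) :
    PySem.Chars.strip t = t := by
  have hl : PySem.Chars.lstrip t = t := by
    cases t with
    | nil => rfl
    | cons a l => simp [PySem.Chars.lstrip, h a (by simp)]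
  have hr : PySem.Chars.rstrip t = t := by
    simp only [PySem.Chars.rstrip]
    cases ht : t.reverse with
    | nil =>
      have : t = [] := by simpa using congrArg List.reverse ht
      simp [this]
    | cons a l =>
      have ha : PySem.Chars.isspace a = false := by
        refine h a ?_
        rw [← List.mem_reverse, ht]; simp
      rw [List.dropWhile_cons, ha]
      simp [← ht]
  simp [PySem.Chars.strip, hl, hr]

-- the fold invariant linking A's three lists to B's three flags
lemma pv_main (tl : List Char) (toks : List (List Char))
    (hws : ∀ t ∈ toks, ∀ c ∈ t, PySem.Chars.isspace c = false) :
    ∀ (mh mn bo : List (List Char)),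
      toks.foldl (pvFuseStep tl)
        (mn.any (fun w => PySem.Chars.isIn w tl), !mh.isEmpty,
          mh.any (fun w => PySem.Chars.isIn w tl))
      = (let p := toks.foldl pvParseStep (mh, mn, bo)
         (p.2.1.any (fun w => PySem.Chars.isIn w tl), !p.1.isEmpty,
          p.1.any (fun w => PySem.Chars.isIn w tl))) := by
  induction toks with
  | nil => intro mh mn bo; rfl
  | cons t rest ih =>
    intro mh mn bo
    have hwst : ∀ c ∈ t, PySem.Chars.isspace c = false := hws t (by simp)
    have hwsr : ∀ u ∈ rest, ∀ c ∈ u, PySem.Chars.isspace c = false :=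
      fun u hu => hws u (by simp [hu])
    simp only [List.foldl_cons]
    have hstrip : PySem.Chars.strip t = t := pv_strip_id t hwst
    cases t with
    | nil =>
      have hA : pvParseStep (mh, mn, bo) [] = (mh, mn, bo) := by
        simp [pvParseStep, hstrip]
      have hB : pvFuseStep tl
          (mn.any (fun w => PySem.Chars.isIn w tl), !mh.isEmpty,
            mh.any (fun w => PySem.Chars.isIn w tl)) [] =
          (mn.any (fun w => PySem.Chars.isIn w tl), !mh.isEmpty,
            mh.any (fun w => PySem.Chars.isIn w tl)) := by
        simp [pvFuseStep, PySem.Chars.startswith]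
      rw [hA, hB, ih hwsr]
    | cons c cs =>
      by_cases hplus : '+' = c
      · cases hplus
        have hA : pvParseStep (mh, mn, bo) ('+' :: cs) =
            (mh ++ [PySem.Chars.lower cs], mn, bo) := by
          simp [pvParseStep, hstrip, PySem.Chars.startswith, List.isPrefixOf]
        have hB : pvFuseStep tl
            (mn.any (fun w => PySem.Chars.isIn w tl), !mh.isEmpty,
              mh.any (fun w => PySem.Chars.isIn w tl)) ('+' :: cs) =
            (mn.any (fun w => PySem.Chars.isIn w tl), true,
              mh.any (fun w => PySem.Chars.isIn w tl) ||
                PySem.Chars.isIn (PySem.Chars.lower cs) tl) := by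
          simp [pvFuseStep, PySem.Chars.startswith, List.isPrefixOf]
        rw [hA, hB]
        have hne : (!(mh ++ [PySem.Chars.lower cs]).isEmpty) = true := by simp
        have := ih hwsr (mh ++ [PySem.Chars.lower cs]) mn bo
        rw [List.any_append] at this
        simp only [hne, List.any_cons, List.any_nil, Bool.or_false] at this
        exact this
      · by_cases hbang : '!' = c
        · cases hbang
          have hA : pvParseStep (mh, mn, bo) ('!' :: cs) =
              (mh, mn ++ [PySem.Chars.lower cs], bo) := by
            simp [pvParseStep, hstrip, PySem.Chars.startswith, List.isPrefixOf]
          have hB : pvFuseStep tl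
              (mn.any (fun w => PySem.Chars.isIn w tl), !mh.isEmpty,
                mh.any (fun w => PySem.Chars.isIn w tl)) ('!' :: cs) =
              (mn.any (fun w => PySem.Chars.isIn w tl) ||
                  PySem.Chars.isIn (PySem.Chars.lower cs) tl, !mh.isEmpty,
                mh.any (fun w => PySem.Chars.isIn w tl)) := by
            simp [pvFuseStep, PySem.Chars.startswith, List.isPrefixOf]
          rw [hA, hB]
          have := ih hwsr mh (mn ++ [PySem.Chars.lower cs]) bo
          rw [List.any_append] at this
          simp only [List.any_cons, List.any_nil, Bool.or_false] at this
          exact this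
        · have hA : pvParseStep (mh, mn, bo) (c :: cs) =
              (mh, mn, bo ++ [PySem.Chars.lower (c :: cs)]) := by
            simp [pvParseStep, hstrip, PySem.Chars.startswith, hplus, hbang]
          have hB : pvFuseStep tl
              (mn.any (fun w => PySem.Chars.isIn w tl), !mh.isEmpty,
                mh.any (fun w => PySem.Chars.isIn w tl)) (c :: cs) =
              (mn.any (fun w => PySem.Chars.isIn w tl), !mh.isEmpty,
                mh.any (fun w => PySem.Chars.isIn w tl)) := by
            simp [pvFuseStep, PySem.Chars.startswith, hplus, hbang]
          rw [hA, hB, ih hwsr]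

-- ===== VERDICT (by name: the statement is the Claim_ definition above) =====
theorem industry_keyword_match_py_spec : Claim_equal_industry_keyword_match_py := by
  intro text keyword_str _
  unfold Spec_industry_keyword_match_py
  have h := pv_main (PySem.Chars.lower text.toList)
    (PySem.Chars.split₀ keyword_str.toList)
    (pv_split₀_wsfree keyword_str.toList) [] [] []
  simp only [List.any_nil, List.isEmpty_nil, Bool.not_true] at h
  simp only [industry_keyword_match_py, industry_keyword_match_py_alt, pvParseKeywords, h]
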